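-- pv_equiv track=rewrite | github.com/tarunyadav0204/Astrology | backend/calculators/pushkara_calculator.py | _get_house_lordships
-- ===== SOURCE A (Python) =====
-- from typing import Dict, Any, List
--
-- def _get_house_lordships(planet_name: str, ascendant_sign: int) -> List[int]:
--     """Get houses ruled by planet"""
--     sign_lords = {
--         0: 'Mars', 1: 'Venus', 2: 'Mercury', 3: 'Moon', 4: 'Sun', 5: 'Mercury',
--         6: 'Venus', 7: 'Mars', 8: 'Jupiter', 9: 'Saturn', 10: 'Saturn', 11: 'Jupiter'
--     }
--
--     ruled_houses = []
--     for house in range(1, 13):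
--         house_sign = (ascendant_sign + house - 1) % 12
--         if sign_lords[house_sign] == planet_name:
--             ruled_houses.append(house)
--
--     return ruled_houses
-- ===== SOURCE B (Python) =====
-- from typing import List
--
-- # reverse index: planet -> signs it rules
-- _RULED_SIGNS = {
--     'Mars': [0, 7], 'Venus': [1, 6], 'Mercury': [2, 5], 'Moon': [3],
--     'Sun': [4], 'Jupiter': [8, 11], 'Saturn': [9, 10],
-- }
--
-- def _get_house_lordships(planet_name: str, ascendant_sign: int) -> List[int]:
--     """Get houses ruled by planet"""
--     return sorted((sign - ascendant_sign) % 12 + 1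
--                   for sign in _RULED_SIGNS.get(planet_name, []))
-- ===== Notes on version B (the rewrite author's own statement) =====
-- stated objective: idiomatic
-- what changed: B replaces A's scan of all 12 houses (computing each house's sign and its lord) with a reverse index planet->ruled signs, mapping each ruled sign directly to its house number and sorting the (at most 2) results.
import Mathlib
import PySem

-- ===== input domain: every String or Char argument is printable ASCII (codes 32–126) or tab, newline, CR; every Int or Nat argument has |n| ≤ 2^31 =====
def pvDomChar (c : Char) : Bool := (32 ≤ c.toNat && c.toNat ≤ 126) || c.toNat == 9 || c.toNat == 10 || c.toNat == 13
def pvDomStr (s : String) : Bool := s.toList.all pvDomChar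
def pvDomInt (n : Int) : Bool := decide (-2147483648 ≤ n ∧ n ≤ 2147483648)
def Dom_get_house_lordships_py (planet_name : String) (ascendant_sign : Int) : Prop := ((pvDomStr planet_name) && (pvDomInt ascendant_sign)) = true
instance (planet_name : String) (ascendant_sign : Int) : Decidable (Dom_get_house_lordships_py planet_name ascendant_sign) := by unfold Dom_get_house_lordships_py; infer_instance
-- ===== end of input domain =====

-- B replaces A's scan of all 12 houses with a reverse index planet -> ruled signs; equal on all inputs.

-- ===== PORT A =====
-- the sign_lords dict literal of A
def pvSignLords : PySem.Dict Int String :=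
  PySem.Dict.ofList [(0, "Mars"), (1, "Venus"), (2, "Mercury"), (3, "Moon"), (4, "Sun"),
    (5, "Mercury"), (6, "Venus"), (7, "Mars"), (8, "Jupiter"), (9, "Saturn"),
    (10, "Saturn"), (11, "Jupiter")]

def get_house_lordships_py (planet_name : String) (ascendant_sign : Int) : List Int :=
  -- for house in range(1, 13): append house when sign_lords[house_sign] == planet_name
  (PySem.List.pyRange 1 13 1).foldl
    (fun ruled_houses house =>
      let house_sign := PySem.Int.mod (ascendant_sign + house - 1) 12
      -- sign_lords[house_sign]: the key is always present (0 ≤ house_sign < 12), so getD is exact here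
      if pvSignLords.getD house_sign "" == planet_name then ruled_houses ++ [house]
      else ruled_houses) []

-- ===== PORT B =====
-- the reverse index of Source B: planet -> list of signs it rules
def pvRuledSigns : PySem.Dict String (List Int) :=
  PySem.Dict.ofList [("Mars", [0, 7]), ("Venus", [1, 6]), ("Mercury", [2, 5]), ("Moon", [3]),
    ("Sun", [4]), ("Jupiter", [8, 11]), ("Saturn", [9, 10])]

def get_house_lordships_py_alt (planet_name : String) (ascendant_sign : Int) : List Int :=
  PySem.List.sorted
    ((pvRuledSigns.getD planet_name []).map
      (fun sign => PySem.Int.mod (sign - ascendant_sign) 12 + 1))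
    (fun x => x)

-- ===== PRECONDITION & SPEC =====
def Spec_get_house_lordships_py (planet_name : String) (ascendant_sign : Int) (out : List Int) : Prop := out = get_house_lordships_py_alt planet_name ascendant_sign
instance (planet_name : String) (ascendant_sign : Int) (out : List Int) : Decidable (Spec_get_house_lordships_py planet_name ascendant_sign out) := by unfold Spec_get_house_lordships_py; infer_instance

-- ===== CLAIM (what is proved, stated in full; the proofs are below) =====
def Claim_equal_get_house_lordships_py : Prop := ∀ (planet_name : String) (ascendant_sign : Int), Dom_get_house_lordships_py planet_name ascendant_sign → Spec_get_house_lordships_py planet_name ascendant_sign (get_house_lordships_py planet_name ascendant_sign)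

-- ===== LEMMAS AND PROOFS =====

-- both ports depend on the ascendant only through its residue mod 12
theorem portA_mod (p : String) (a : Int) :
    get_house_lordships_py p a = get_house_lordships_py p (a % 12) := by
  have key : ∀ h : Int, PySem.Int.mod (a % 12 + h - 1) 12 = PySem.Int.mod (a + h - 1) 12 := by
    intro h
    rw [PySem.Int.mod_eq_emod_of_pos (by norm_num), PySem.Int.mod_eq_emod_of_pos (by norm_num)]
    omega
  simp only [get_house_lordships_py, key]

theorem portB_mod (p : String) (a : Int) :
    get_house_lordships_py_alt p a = get_house_lordships_py_alt p (a % 12) := by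
  have key : ∀ s : Int, PySem.Int.mod (s - a % 12) 12 = PySem.Int.mod (s - a) 12 := by
    intro s
    rw [PySem.Int.mod_eq_emod_of_pos (by norm_num), PySem.Int.mod_eq_emod_of_pos (by norm_num)]
    omega
  simp only [get_house_lordships_py_alt, key]

-- agreement for every residue, for one fixed planet name
theorem agree_of_name (p : String) (hp : p = "Mars" ∨ p = "Venus" ∨ p = "Mercury" ∨ p = "Moon"
    ∨ p = "Sun" ∨ p = "Jupiter" ∨ p = "Saturn") (r : Int) (h0 : 0 ≤ r) (h12 : r < 12) :
    get_house_lordships_py p r = get_house_lordships_py_alt p r := by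
  rcases hp with h | h | h | h | h | h | h <;> subst h <;> interval_cases r <;> decide

-- for a name that rules no sign, both ports return []
theorem foldl_if_false (c : Int → Bool) (hc : ∀ x, c x = false) (l : List Int) (acc : List Int) :
    List.foldl (fun r h => if c h then r ++ [h] else r) acc l = acc := by
  induction l generalizing acc with
  | nil => rfl
  | cons x xs ih => simp [List.foldl, hc x, ih]

theorem signLords_getD_mem (m : Int) (h0 : 0 ≤ m) (h12 : m < 12) :
    pvSignLords.getD m "" = "Mars" ∨ pvSignLords.getD m "" = "Venus" ∨
    pvSignLords.getD m "" = "Mercury" ∨ pvSignLords.getD m "" = "Moon" ∨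
    pvSignLords.getD m "" = "Sun" ∨ pvSignLords.getD m "" = "Jupiter" ∨
    pvSignLords.getD m "" = "Saturn" := by
  interval_cases m <;> decide

theorem agree_other (p : String)
    (h1 : p ≠ "Mars") (h2 : p ≠ "Venus") (h3 : p ≠ "Mercury") (h4 : p ≠ "Moon")
    (h5 : p ≠ "Sun") (h6 : p ≠ "Jupiter") (h7 : p ≠ "Saturn") (a : Int) :
    get_house_lordships_py p a = get_house_lordships_py_alt p a := by
  have hcond : ∀ x : Int,
      (pvSignLords.getD (PySem.Int.mod x 12) "" == p) = false := by
    intro x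
    rcases signLords_getD_mem (PySem.Int.mod x 12) (PySem.Int.mod_nonneg x (by norm_num))
        (PySem.Int.mod_lt x (by norm_num)) with h | h | h | h | h | h | h <;>
      rw [h] <;> simp only [beq_eq_false_iff_ne, ne_eq] <;>
      first
        | exact fun hh => h1 hh.symm
        | exact fun hh => h2 hh.symm
        | exact fun hh => h3 hh.symm
        | exact fun hh => h4 hh.symm
        | exact fun hh => h5 hh.symm
        | exact fun hh => h6 hh.symm
        | exact fun hh => h7 hh.symm
  have hA : get_house_lordships_py p a = [] :=
    foldl_if_false (fun h => pvSignLords.getD (PySem.Int.mod (a + h - 1) 12) "" == p)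
      (fun h => hcond (a + h - 1)) (PySem.List.pyRange 1 13 1) []
  have c1 : ("Mars" == p) = false := by simp only [beq_eq_false_iff_ne, ne_eq]; exact fun h => h1 h.symm
  have c2 : ("Venus" == p) = false := by simp only [beq_eq_false_iff_ne, ne_eq]; exact fun h => h2 h.symm
  have c3 : ("Mercury" == p) = false := by simp only [beq_eq_false_iff_ne, ne_eq]; exact fun h => h3 h.symm
  have c4 : ("Moon" == p) = false := by simp only [beq_eq_false_iff_ne, ne_eq]; exact fun h => h4 h.symm
  have c5 : ("Sun" == p) = false := by simp only [beq_eq_false_iff_ne, ne_eq]; exact fun h => h5 h.symm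
  have c6 : ("Jupiter" == p) = false := by simp only [beq_eq_false_iff_ne, ne_eq]; exact fun h => h6 h.symm
  have c7 : ("Saturn" == p) = false := by simp only [beq_eq_false_iff_ne, ne_eq]; exact fun h => h7 h.symm
  have hd : pvRuledSigns = PySem.Dict.mk [("Mars", ([0, 7] : List Int)), ("Venus", [1, 6]),
      ("Mercury", [2, 5]), ("Moon", [3]), ("Sun", [4]), ("Jupiter", [8, 11]),
      ("Saturn", [9, 10])] := by rfl
  have hget : pvRuledSigns.getD p [] = [] := by
    rw [hd]
    simp only [PySem.Dict.getD_eq_get?_getD, PySem.Dict.get?_mk_cons, c1, c2, c3, c4, c5, c6, c7]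
    rfl
  have hB : get_house_lordships_py_alt p a = [] := by
    unfold get_house_lordships_py_alt
    rw [hget]
    rfl
  rw [hA, hB]

-- ===== VERDICT (by name: the statement is the Claim_ definition above) =====
theorem get_house_lordships_py_spec : Claim_equal_get_house_lordships_py := by
  intro p a _
  unfold Spec_get_house_lordships_py
  by_cases hp : p = "Mars" ∨ p = "Venus" ∨ p = "Mercury" ∨ p = "Moon"
      ∨ p = "Sun" ∨ p = "Jupiter" ∨ p = "Saturn"
  · rw [portA_mod, portB_mod]
    exact agree_of_name p hp (a % 12) (Int.emod_nonneg a (by norm_num))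
      (Int.emod_lt_of_pos a (by norm_num))
  · push Not at hp
    obtain ⟨h1, h2, h3, h4, h5, h6, h7⟩ := hp
    exact agree_other p h1 h2 h3 h4 h5 h6 h7 a
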